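-- pv_equiv track=rewrite | github.com/GitMonsters/octotetrahedral-agi | arc-puzzle-catalog/re-arc/solves/212c2741/solver.py | transform
-- ===== SOURCE A (Python) =====
-- def transform(grid):
--     from collections import Counter
--
--     rows = len(grid)
--     cols = len(grid[0])
--
--     freq = Counter()
--     for r in range(rows):
--         for c in range(cols):
--             freq[grid[r][c]] += 1
--     colors = freq.most_common()
--     bg = colors[0][0]
--
--     other_colors = [co for co, _ in colors[1:]]
--
--     def is_rectangle(color):
--         positions = [(r, c) for r in range(rows) for c in range(cols) if grid[r][c] == color]
--         if not positions:
--             return False, None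
--         min_r = min(r for r, c in positions)
--         max_r = max(r for r, c in positions)
--         min_c = min(c for r, c in positions)
--         max_c = max(c for r, c in positions)
--         expected = (max_r - min_r + 1) * (max_c - min_c + 1)
--         return len(positions) == expected, (min_r, max_r, min_c, max_c)
--
--     rect_color = None
--     scatter_color = None
--     rect_bounds = None
--     for color in other_colors:
--         is_rect, bounds = is_rectangle(color)
--         if is_rect:
--             rect_color = color
--             rect_bounds = bounds
--         else:
--             scatter_color = color
--
--     if rect_bounds is None:
--         return [row[:] for row in grid]
--
--     top_r, bot_r, left_c, right_c = rect_bounds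
--
--     scatter_pts = [(r, c) for r in range(rows) for c in range(cols) if grid[r][c] == scatter_color]
--
--     projected = []
--     for r, c in scatter_pts:
--         above = r < top_r
--         below = r > bot_r
--         left = c < left_c
--         right = c > right_c
--         in_row = top_r <= r <= bot_r
--         in_col = left_c <= c <= right_c
--
--         if above and in_col:
--             projected.append((top_r - 1, c))
--         elif below and in_col:
--             projected.append((bot_r + 1, c))
--         elif left and in_row:
--             projected.append((r, left_c - 1))
--         elif right and in_row:
--             projected.append((r, right_c + 1))
--         elif above and left:
--             projected.append((top_r - 1, left_c - 1))
--         elif above and right: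
--             projected.append((top_r - 1, right_c + 1))
--         elif below and left:
--             projected.append((bot_r + 1, left_c - 1))
--         elif below and right:
--             projected.append((bot_r + 1, right_c + 1))
--
--     out = [[bg] * cols for _ in range(rows)]
--     for r in range(top_r, bot_r + 1):
--         for c in range(left_c, right_c + 1):
--             out[r][c] = rect_color
--     for r, c in projected:
--         out[r][c] = scatter_color
--
--     return out
-- ===== SOURCE B (Python) =====
-- def transform(grid):
--     rows = len(grid)
--     cols = len(grid[0])
--
--     by_color = {}
--     for r in range(rows):
--         for c in range(cols):
--             by_color.setdefault(grid[r][c], []).append((r, c))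
--
--     counts = [(co, len(ps)) for co, ps in by_color.items()]
--     order = sorted(counts, key=lambda kv: kv[1], reverse=True)
--     bg = order[0][0]
--
--     rect = None          # (color, top, bottom, left, right)
--     scatter_color = None
--     for color, _ in order[1:]:
--         pts = by_color[color]
--         min_r = max_r = pts[0][0]
--         min_c = max_c = pts[0][1]
--         for r, c in pts[1:]:
--             min_r = min(min_r, r)
--             max_r = max(max_r, r)
--             min_c = min(min_c, c)
--             max_c = max(max_c, c)
--         if len(pts) == (max_r - min_r + 1) * (max_c - min_c + 1):
--             rect = (color, min_r, max_r, min_c, max_c)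
--         else:
--             scatter_color = color
--
--     if rect is None:
--         return [row[:] for row in grid]
--     rect_color, top_r, bot_r, left_c, right_c = rect
--
--     out = [[bg] * cols for _ in range(rows)]
--     for r in range(top_r, bot_r + 1):
--         for c in range(left_c, right_c + 1):
--             out[r][c] = rect_color
--
--     if scatter_color is not None:
--         for r, c in by_color[scatter_color]:
--             if not (top_r <= r <= bot_r and left_c <= c <= right_c):
--                 nr = top_r - 1 if r < top_r else (bot_r + 1 if r > bot_r else r)
--                 nc = left_c - 1 if c < left_c else (right_c + 1 if c > right_c else c)
--                 out[nr][nc] = scatter_color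
--     return out
-- ===== Notes on version B (the rewrite author's own statement) =====
-- stated objective: faster
-- what changed: One row-major pass buckets every cell position by color into a dict, so per-color rectangle tests and the scatter-point list are read off the buckets instead of re-scanning the whole grid once per color; the 8-branch projection collapses into a per-axis conditional.
import Mathlib
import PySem

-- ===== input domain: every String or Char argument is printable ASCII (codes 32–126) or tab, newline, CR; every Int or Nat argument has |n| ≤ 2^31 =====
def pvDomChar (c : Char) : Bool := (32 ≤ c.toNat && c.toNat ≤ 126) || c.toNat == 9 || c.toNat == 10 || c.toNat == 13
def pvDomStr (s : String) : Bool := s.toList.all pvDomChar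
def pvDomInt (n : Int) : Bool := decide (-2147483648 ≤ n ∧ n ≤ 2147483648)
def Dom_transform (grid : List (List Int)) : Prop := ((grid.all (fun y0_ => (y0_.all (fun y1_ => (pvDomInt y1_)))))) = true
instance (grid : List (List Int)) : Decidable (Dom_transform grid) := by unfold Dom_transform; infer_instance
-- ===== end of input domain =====

-- B replaces A's one-full-grid-scan-per-color with a single row-major pass that buckets
-- cell positions by color; per-color bounds, the rectangle test and the scatter points are
-- read off the buckets, and the 8-branch projection becomes one conditional per axis.

-- ===== PORT A =====

-- grid[r][c]; exact for the non-negative in-range indices both programs use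
def pvCellVal (grid : List (List Int)) (r c : Int) : Int :=
  PySem.List.pyGetD (PySem.List.pyGetD grid r []) c 0

-- out[r][c] = v; exact for the non-negative in-range indices both programs use
def pySet2 (out : List (List Int)) (r c : Int) (v : Int) : List (List Int) :=
  out.set r.toNat ((out.getD r.toNat []).set c.toNat v)

-- A's is_rectangle(color): positions comprehension re-scans the whole grid
def isRectangleA (grid : List (List Int)) (rows cols color : Int) :
    Bool × Option (Int × Int × Int × Int) :=
  let positions := (PySem.List.pyRange 0 rows 1).flatMap (fun r =>
      ((PySem.List.pyRange 0 cols 1).filter (fun c => pvCellVal grid r c == color)).map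
        (fun c => (r, c)))
  if positions = [] then (false, none)
  else
    let min_r := (PySem.List.min? (positions.map Prod.fst) (fun x => x)).getD 0
    let max_r := (PySem.List.max? (positions.map Prod.fst) (fun x => x)).getD 0
    let min_c := (PySem.List.min? (positions.map Prod.snd) (fun x => x)).getD 0
    let max_c := (PySem.List.max? (positions.map Prod.snd) (fun x => x)).getD 0
    let expected := (max_r - min_r + 1) * (max_c - min_c + 1)
    (decide ((positions.length : Int) = expected), some (min_r, max_r, min_c, max_c))

-- rect_color and rect_bounds are assigned together in A, so the port carries them as one Option
def transform (grid : List (List Int)) : List (List Int) :=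
  let rows : Int := grid.length
  let cols : Int := ((PySem.List.pyGetD grid 0 []).length : Int)
  let freq := (PySem.List.pyRange 0 rows 1).foldl (fun d r =>
      (PySem.List.pyRange 0 cols 1).foldl (fun d c =>
        d.modify (pvCellVal grid r c) 0 (fun n => n + 1)) d)
      (PySem.Dict.empty : PySem.Dict Int Int)
  let colors := PySem.List.sorted freq.items (fun kv => kv.2) true
  match colors with
  | [] => []   -- unreachable under Pre_ (colors[0][0] raises exactly there)
  | (bg, _) :: rest =>
    let other_colors := rest.map Prod.fst
    let st := other_colors.foldl
      (fun (st : Option (Int × Int × Int × Int × Int) × Option Int) color =>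
        let res := isRectangleA grid rows cols color
        if res.1 then
          (match res.2 with
           | some (a, b, cl, cr) => some (color, a, b, cl, cr)
           | none => st.1, st.2)
        else (st.1, some color)) (none, none)
    match st.1 with
    | none => grid.map (fun row => PySem.List.slice row none none)
    | some (rect_color, top_r, bot_r, left_c, right_c) =>
      let scatter_pts := (PySem.List.pyRange 0 rows 1).flatMap (fun r =>
          ((PySem.List.pyRange 0 cols 1).filter (fun c =>
              some (pvCellVal grid r c) == st.2)).map (fun c => (r, c)))
      let projected := scatter_pts.foldl (fun acc rc =>
          let r := rc.1; let c := rc.2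
          if r < top_r ∧ (left_c ≤ c ∧ c ≤ right_c) then acc ++ [(top_r - 1, c)]
          else if r > bot_r ∧ (left_c ≤ c ∧ c ≤ right_c) then acc ++ [(bot_r + 1, c)]
          else if c < left_c ∧ (top_r ≤ r ∧ r ≤ bot_r) then acc ++ [(r, left_c - 1)]
          else if c > right_c ∧ (top_r ≤ r ∧ r ≤ bot_r) then acc ++ [(r, right_c + 1)]
          else if r < top_r ∧ c < left_c then acc ++ [(top_r - 1, left_c - 1)]
          else if r < top_r ∧ c > right_c then acc ++ [(top_r - 1, right_c + 1)]
          else if r > bot_r ∧ c < left_c then acc ++ [(bot_r + 1, left_c - 1)]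
          else if r > bot_r ∧ c > right_c then acc ++ [(bot_r + 1, right_c + 1)]
          else acc) []
      let out0 := List.replicate rows.toNat (List.replicate cols.toNat bg)
      let out1 := (PySem.List.pyRange top_r (bot_r + 1) 1).foldl (fun o r =>
          (PySem.List.pyRange left_c (right_c + 1) 1).foldl
            (fun o c => pySet2 o r c rect_color) o) out0
      projected.foldl (fun o rc => pySet2 o rc.1 rc.2 (st.2.getD 0)) out1

-- ===== PORT B =====

def transform_alt (grid : List (List Int)) : List (List Int) :=
  let rows : Int := grid.length
  let cols : Int := ((PySem.List.pyGetD grid 0 []).length : Int)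
  let by_color := (PySem.List.pyRange 0 rows 1).foldl (fun d r =>
      (PySem.List.pyRange 0 cols 1).foldl (fun d c =>
        d.modify (pvCellVal grid r c) [] (fun ps => ps ++ [(r, c)])) d)
      (PySem.Dict.empty : PySem.Dict Int (List (Int × Int)))
  let counts := by_color.items.map (fun kv => (kv.1, (kv.2.length : Int)))
  let order := PySem.List.sorted counts (fun kv => kv.2) true
  match order with
  | [] => []   -- unreachable under Pre_ (order[0][0] raises exactly there)
  | (bg, _) :: rest =>
    let st := rest.foldl
      (fun (st : Option (Int × Int × Int × Int × Int) × Option Int) kv =>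
        match PySem.Dict.getD by_color kv.1 [] with
        | [] => (st.1, some kv.1)   -- totality guard only: a listed color always has points
        | p :: tl =>
          let b := tl.foldl (fun (b : Int × Int × Int × Int) q =>
              (min b.1 q.1, max b.2.1 q.1, min b.2.2.1 q.2, max b.2.2.2 q.2))
            (p.1, p.1, p.2, p.2)
          if (((p :: tl).length : Int) = (b.2.1 - b.1 + 1) * (b.2.2.2 - b.2.2.1 + 1) : Prop) then
            (some (kv.1, b.1, b.2.1, b.2.2.1, b.2.2.2), st.2)
          else (st.1, some kv.1)) (none, none)
    match st.1 with
    | none => grid.map (fun row => PySem.List.slice row none none)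
    | some (rect_color, top_r, bot_r, left_c, right_c) =>
      let out0 := List.replicate rows.toNat (List.replicate cols.toNat bg)
      let out1 := (PySem.List.pyRange top_r (bot_r + 1) 1).foldl (fun o r =>
          (PySem.List.pyRange left_c (right_c + 1) 1).foldl
            (fun o c => pySet2 o r c rect_color) o) out0
      match st.2 with
      | none => out1
      | some s =>
        (PySem.Dict.getD by_color s []).foldl (fun o rc =>
          if ¬ (top_r ≤ rc.1 ∧ rc.1 ≤ bot_r ∧ left_c ≤ rc.2 ∧ rc.2 ≤ right_c) then
            pySet2 o
              (if rc.1 < top_r then top_r - 1 else if rc.1 > bot_r then bot_r + 1 else rc.1)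
              (if rc.2 < left_c then left_c - 1 else if rc.2 > right_c then right_c + 1 else rc.2)
              s
          else o) out1

-- ===== PRECONDITION & SPEC =====
-- Pre_: exactly where Python A returns normally — a nonempty grid with a nonempty first row
-- and no row shorter than the first (otherwise grid[0][0] / grid[r][c] raises IndexError).
def Pre_transform (grid : List (List Int)) : Prop :=
  grid ≠ [] ∧ 0 < (PySem.List.pyGetD grid 0 []).length ∧
    ∀ row ∈ grid, (PySem.List.pyGetD grid 0 []).length ≤ row.length
instance (grid : List (List Int)) : Decidable (Pre_transform grid) := by
  unfold Pre_transform; infer_instance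

def pvWitness_transform : List (List Int) :=
  [[0, 0, 0, 0], [0, 1, 1, 0], [0, 1, 1, 0], [2, 0, 0, 2]]

def Spec_transform (grid : List (List Int)) (out : List (List Int)) : Prop := out = transform_alt grid
instance (grid : List (List Int)) (out : List (List Int)) : Decidable (Spec_transform grid out) := by unfold Spec_transform; infer_instance

-- ===== CLAIM (what is proved, stated in full; the proofs are below) =====
def Claim_equal_transform : Prop := ∀ (grid : List (List Int)), Dom_transform grid → Pre_transform grid → Spec_transform grid (transform grid)

-- ===== LEMMAS AND PROOFS =====

def pvCells (rows cols : Int) : List (Int × Int) :=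
  (PySem.List.pyRange 0 rows 1).flatMap (fun r => (PySem.List.pyRange 0 cols 1).map (fun c => (r, c)))

def pvVal (grid : List (List Int)) (p : Int × Int) : Int := pvCellVal grid p.1 p.2

theorem pv_foldl_nested {γ : Type} (rows cols : Int) (f : γ → Int → Int → γ) (init : γ) :
    (PySem.List.pyRange 0 rows 1).foldl
      (fun a r => (PySem.List.pyRange 0 cols 1).foldl (fun a c => f a r c) a) init
    = (pvCells rows cols).foldl (fun a p => f a p.1 p.2) init := by
  simp [pvCells, List.foldl_flatMap, List.foldl_map]

theorem pv_comp_eq_filter (rows cols : Int) (p : Int → Int → Bool) :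
    ((PySem.List.pyRange 0 rows 1).flatMap (fun r =>
      ((PySem.List.pyRange 0 cols 1).filter (fun c => p r c)).map (fun c => (r, c))))
    = (pvCells rows cols).filter (fun q => p q.1 q.2) := by
  simp only [pvCells, List.filter_flatMap, List.filter_map]
  rfl

theorem pv_freq_eq (grid : List (List Int)) (rows cols : Int) :
    (PySem.List.pyRange 0 rows 1).foldl (fun d r =>
      (PySem.List.pyRange 0 cols 1).foldl (fun d c =>
        d.modify (pvCellVal grid r c) 0 (fun n => n + 1)) d)
      (PySem.Dict.empty : PySem.Dict Int Int)
    = PySem.Dict.counter ((pvCells rows cols).map (pvVal grid)) := by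
  rw [pv_foldl_nested (f := fun d r c => PySem.Dict.modify d (pvCellVal grid r c) 0 (fun n => n + 1))]
  rw [PySem.Dict.counter_eq_foldl, List.foldl_map]
  rfl

theorem pv_bycolor_getD (grid : List (List Int)) (rows cols co : Int) :
    ((PySem.List.pyRange 0 rows 1).foldl (fun d r =>
      (PySem.List.pyRange 0 cols 1).foldl (fun d c =>
        d.modify (pvCellVal grid r c) [] (fun ps => ps ++ [(r, c)])) d)
      (PySem.Dict.empty : PySem.Dict Int (List (Int × Int)))).getD co []
    = (pvCells rows cols).filter (fun p => pvVal grid p == co) := by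
  rw [pv_foldl_nested (f := fun d r c => PySem.Dict.modify d (pvCellVal grid r c) [] (fun ps => ps ++ [(r, c)]))]
  have h := PySem.Dict.getD_foldl_modify_append
    (l := (pvCells rows cols).map (fun p => (pvVal grid p, p)))
    (d := (PySem.Dict.empty : PySem.Dict Int (List (Int × Int)))) (c := co)
  rw [List.foldl_map] at h
  simp only [pvVal] at h ⊢
  rw [h, PySem.Dict.getD_empty, List.nil_append, List.filter_map, List.map_map]
  simp only [Function.comp_def]
  simp [List.map_id']

theorem pv_bucket_getD (grid : List (List Int)) (rows cols co : Int) :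
    ((pvCells rows cols).foldl (fun a p =>
        a.modify (pvCellVal grid p.1 p.2) [] (fun ps => ps ++ [(p.1, p.2)]))
      (PySem.Dict.empty : PySem.Dict Int (List (Int × Int)))).getD co []
    = (pvCells rows cols).filter (fun p => pvCellVal grid p.1 p.2 == co) := by
  have h := pv_bycolor_getD grid rows cols co
  rw [pv_foldl_nested (f := fun d r c => PySem.Dict.modify d (pvCellVal grid r c) [] (fun ps => ps ++ [(r, c)]))] at h
  simpa [pvVal] using h

theorem pv_counts_eq (grid : List (List Int)) (rows cols : Int) :
    (((pvCells rows cols).foldl (fun a p =>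
        a.modify (pvCellVal grid p.1 p.2) [] (fun ps => ps ++ [(p.1, p.2)]))
      (PySem.Dict.empty : PySem.Dict Int (List (Int × Int)))).items).map
        (fun kv => (kv.1, (kv.2.length : Int)))
    = (PySem.Dict.counter ((pvCells rows cols).map (pvVal grid))).items := by
  have hnd : ((pvCells rows cols).foldl (fun a p =>
        a.modify (pvCellVal grid p.1 p.2) [] (fun ps => ps ++ [(p.1, p.2)]))
      (PySem.Dict.empty : PySem.Dict Int (List (Int × Int)))).keys.Nodup := by
    exact PySem.Dict.nodup_keys_foldl_modify_key (pvCells rows cols)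
      (fun p => pvCellVal grid p.1 p.2) [] (fun _ p ps => ps ++ [(p.1, p.2)]) _
      (by simp)
  have hk : ((pvCells rows cols).foldl (fun a p =>
        a.modify (pvCellVal grid p.1 p.2) [] (fun ps => ps ++ [(p.1, p.2)]))
      (PySem.Dict.empty : PySem.Dict Int (List (Int × Int)))).keys
      = PySem.Set.ofList ((pvCells rows cols).map (pvVal grid)) := by
    rw [PySem.Dict.keys_foldl_modify_key (pvCells rows cols)
      (fun p => pvCellVal grid p.1 p.2) [] (fun _ p ps => ps ++ [(p.1, p.2)]) _]
    simp only [PySem.Set.ofList_eq_foldl, PySem.Set.update, PySem.Dict.keys_empty]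
    rfl
  rw [PySem.Dict.items_counter, PySem.Dict.items_eq_map_keys _ hnd [], hk, List.map_map]
  refine List.map_congr_left fun k _ => ?_
  simp only [Function.comp_def]
  rw [pv_bucket_getD]
  have : (List.filter (fun p => pvCellVal grid p.1 p.2 == k) (pvCells rows cols)).length
      = List.count k (List.map (pvVal grid) (pvCells rows cols)) := by
    rw [List.count, ← List.countP_eq_length_filter, List.countP_map]
    rfl
  rw [this]

theorem pv_bounds_fold (tl : List (Int × Int)) (a b c d : Int) :
    tl.foldl (fun (s : Int × Int × Int × Int) q =>
      (min s.1 q.1, max s.2.1 q.1, min s.2.2.1 q.2, max s.2.2.2 q.2)) (a, b, c, d)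
    = (tl.foldl (fun m q => min m q.1) a, tl.foldl (fun m q => max m q.1) b,
       tl.foldl (fun m q => min m q.2) c, tl.foldl (fun m q => max m q.2) d) := by
  induction tl generalizing a b c d with
  | nil => rfl
  | cons x xs ih => simp only [List.foldl_cons, ih]

theorem pv_body_eq (grid : List (List Int)) (rows cols : Int)
    (st : Option (Int × Int × Int × Int × Int) × Option Int) (co : Int) :
    (if (isRectangleA grid rows cols co).1 then
       (match (isRectangleA grid rows cols co).2 with
        | some (a, b, cl, cr) => some (co, a, b, cl, cr)
        | none => st.1, st.2)
     else (st.1, some co))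
    = (match (pvCells rows cols).filter (fun q => pvCellVal grid q.1 q.2 == co) with
       | [] => (st.1, some co)
       | p :: tl =>
         if (((p :: tl).length : Int)
             = ((tl.foldl (fun (b : Int × Int × Int × Int) q => (min b.1 q.1, max b.2.1 q.1, min b.2.2.1 q.2, max b.2.2.2 q.2)) (p.1, p.1, p.2, p.2)).2.1 - (tl.foldl (fun (b : Int × Int × Int × Int) q => (min b.1 q.1, max b.2.1 q.1, min b.2.2.1 q.2, max b.2.2.2 q.2)) (p.1, p.1, p.2, p.2)).1 + 1) * ((tl.foldl (fun (b : Int × Int × Int × Int) q => (min b.1 q.1, max b.2.1 q.1, min b.2.2.1 q.2, max b.2.2.2 q.2)) (p.1, p.1, p.2, p.2)).2.2.2 - (tl.foldl (fun (b : Int × Int × Int × Int) q => (min b.1 q.1, max b.2.1 q.1, min b.2.2.1 q.2, max b.2.2.2 q.2)) (p.1, p.1, p.2, p.2)).2.2.1 + 1) : Prop) then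
           (some (co, (tl.foldl (fun (b : Int × Int × Int × Int) q => (min b.1 q.1, max b.2.1 q.1, min b.2.2.1 q.2, max b.2.2.2 q.2)) (p.1, p.1, p.2, p.2)).1, (tl.foldl (fun (b : Int × Int × Int × Int) q => (min b.1 q.1, max b.2.1 q.1, min b.2.2.1 q.2, max b.2.2.2 q.2)) (p.1, p.1, p.2, p.2)).2.1, (tl.foldl (fun (b : Int × Int × Int × Int) q => (min b.1 q.1, max b.2.1 q.1, min b.2.2.1 q.2, max b.2.2.2 q.2)) (p.1, p.1, p.2, p.2)).2.2.1, (tl.foldl (fun (b : Int × Int × Int × Int) q => (min b.1 q.1, max b.2.1 q.1, min b.2.2.1 q.2, max b.2.2.2 q.2)) (p.1, p.1, p.2, p.2)).2.2.2), st.2)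
         else (st.1, some co)) := by
  unfold isRectangleA
  rw [pv_comp_eq_filter rows cols (fun r c => pvCellVal grid r c == co)]
  cases hf : (pvCells rows cols).filter (fun q => pvCellVal grid q.1 q.2 == co) with
  | nil => simp
  | cons p tl =>
    simp only [pv_bounds_fold, List.map_cons, PySem.List.min?_id_cons, PySem.List.max?_id_cons,
      Option.getD_some, List.foldl_map, List.length_cons, decide_eq_true_eq,
      List.cons_ne_nil, if_false]

theorem pv_proj_step (t b l rr : Int) (acc : List (Int × Int)) (rc : Int × Int) :
    (if rc.1 < t ∧ (l ≤ rc.2 ∧ rc.2 ≤ rr) then acc ++ [(t - 1, rc.2)]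
     else if rc.1 > b ∧ (l ≤ rc.2 ∧ rc.2 ≤ rr) then acc ++ [(b + 1, rc.2)]
     else if rc.2 < l ∧ (t ≤ rc.1 ∧ rc.1 ≤ b) then acc ++ [(rc.1, l - 1)]
     else if rc.2 > rr ∧ (t ≤ rc.1 ∧ rc.1 ≤ b) then acc ++ [(rc.1, rr + 1)]
     else if rc.1 < t ∧ rc.2 < l then acc ++ [(t - 1, l - 1)]
     else if rc.1 < t ∧ rc.2 > rr then acc ++ [(t - 1, rr + 1)]
     else if rc.1 > b ∧ rc.2 < l then acc ++ [(b + 1, l - 1)]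
     else if rc.1 > b ∧ rc.2 > rr then acc ++ [(b + 1, rr + 1)]
     else acc)
    = (if ¬ (t ≤ rc.1 ∧ rc.1 ≤ b ∧ l ≤ rc.2 ∧ rc.2 ≤ rr) then
         acc ++ [((if rc.1 < t then t - 1 else if rc.1 > b then b + 1 else rc.1),
                  (if rc.2 < l then l - 1 else if rc.2 > rr then rr + 1 else rc.2))]
       else acc) := by
  obtain ⟨r, c⟩ := rc
  dsimp only
  split_ifs <;> first | rfl | omega

theorem pv_write_eq (t b l rr s : Int) (pts : List (Int × Int)) (out1 : List (List Int)) :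
    (pts.foldl (fun acc (rc : Int × Int) =>
      if rc.1 < t ∧ (l ≤ rc.2 ∧ rc.2 ≤ rr) then acc ++ [(t - 1, rc.2)]
      else if rc.1 > b ∧ (l ≤ rc.2 ∧ rc.2 ≤ rr) then acc ++ [(b + 1, rc.2)]
      else if rc.2 < l ∧ (t ≤ rc.1 ∧ rc.1 ≤ b) then acc ++ [(rc.1, l - 1)]
      else if rc.2 > rr ∧ (t ≤ rc.1 ∧ rc.1 ≤ b) then acc ++ [(rc.1, rr + 1)]
      else if rc.1 < t ∧ rc.2 < l then acc ++ [(t - 1, l - 1)]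
      else if rc.1 < t ∧ rc.2 > rr then acc ++ [(t - 1, rr + 1)]
      else if rc.1 > b ∧ rc.2 < l then acc ++ [(b + 1, l - 1)]
      else if rc.1 > b ∧ rc.2 > rr then acc ++ [(b + 1, rr + 1)]
      else acc) []).foldl (fun o rc => pySet2 o rc.1 rc.2 s) out1
    = pts.foldl (fun o rc =>
        if ¬ (t ≤ rc.1 ∧ rc.1 ≤ b ∧ l ≤ rc.2 ∧ rc.2 ≤ rr) then
          pySet2 o (if rc.1 < t then t - 1 else if rc.1 > b then b + 1 else rc.1)
                   (if rc.2 < l then l - 1 else if rc.2 > rr then rr + 1 else rc.2) s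
        else o) out1 := by
  simp only [pv_proj_step]
  rw [PySem.List.foldl_append_ite
    (p := fun rc : Int × Int => ¬ (t ≤ rc.1 ∧ rc.1 ≤ b ∧ l ≤ rc.2 ∧ rc.2 ≤ rr))
    (f := fun rc : Int × Int =>
      ((if rc.1 < t then t - 1 else if rc.1 > b then b + 1 else rc.1),
       (if rc.2 < l then l - 1 else if rc.2 > rr then rr + 1 else rc.2)))]
  rw [List.nil_append, List.foldl_map]
  rw [← PySem.List.foldl_ite_eq_foldl_filter
    (p := fun rc : Int × Int => ¬ (t ≤ rc.1 ∧ rc.1 ≤ b ∧ l ≤ rc.2 ∧ rc.2 ≤ rr))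
    (f := fun o (rc : Int × Int) =>
      pySet2 o (if rc.1 < t then t - 1 else if rc.1 > b then b + 1 else rc.1)
               (if rc.2 < l then l - 1 else if rc.2 > rr then rr + 1 else rc.2) s)]


theorem pv_tail_eq (grid : List (List Int)) (rows cols bg : Int)
    (stv : Option (Int × Int × Int × Int × Int) × Option Int) :
    (match stv.1 with
     | none => List.map (fun row => PySem.List.slice row) grid
     | some (rect_color, top_r, bot_r, left_c, right_c) =>
       List.foldl (fun o (rc : Int × Int) => pySet2 o rc.1 rc.2 (stv.2.getD 0))
         (List.foldl
          (fun o r => List.foldl (fun o c => pySet2 o r c rect_color) o (PySem.List.pyRange left_c (right_c + 1)))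
          (List.replicate rows.toNat (List.replicate cols.toNat bg))
          (PySem.List.pyRange top_r (bot_r + 1)))
         (List.foldl
           (fun acc (rc : Int × Int) =>
        if rc.1 < top_r ∧ left_c ≤ rc.2 ∧ rc.2 ≤ right_c then acc ++ [(top_r - 1, rc.2)]
        else if rc.1 > bot_r ∧ left_c ≤ rc.2 ∧ rc.2 ≤ right_c then acc ++ [(bot_r + 1, rc.2)]
        else if rc.2 < left_c ∧ top_r ≤ rc.1 ∧ rc.1 ≤ bot_r then acc ++ [(rc.1, left_c - 1)]
        else if rc.2 > right_c ∧ top_r ≤ rc.1 ∧ rc.1 ≤ bot_r then acc ++ [(rc.1, right_c + 1)]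
        else if rc.1 < top_r ∧ rc.2 < left_c then acc ++ [(top_r - 1, left_c - 1)]
        else if rc.1 < top_r ∧ rc.2 > right_c then acc ++ [(top_r - 1, right_c + 1)]
        else if rc.1 > bot_r ∧ rc.2 < left_c then acc ++ [(bot_r + 1, left_c - 1)]
        else if rc.1 > bot_r ∧ rc.2 > right_c then acc ++ [(bot_r + 1, right_c + 1)]
        else acc)
           []
           (List.flatMap
             (fun r =>
               List.map (fun c => (r, c))
                 (List.filter (fun c => some (pvCellVal grid r c) == stv.2)
                   (PySem.List.pyRange 0 cols)))
             (PySem.List.pyRange 0 rows))))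
    = (match stv.1 with
       | none => List.map (fun row => PySem.List.slice row) grid
       | some (rect_color, top_r, bot_r, left_c, right_c) =>
         match stv.2 with
         | none => (List.foldl
          (fun o r => List.foldl (fun o c => pySet2 o r c rect_color) o (PySem.List.pyRange left_c (right_c + 1)))
          (List.replicate rows.toNat (List.replicate cols.toNat bg))
          (PySem.List.pyRange top_r (bot_r + 1)))
         | some s =>
           List.foldl
             (fun o (rc : Int × Int) =>
               if ¬ (top_r ≤ rc.1 ∧ rc.1 ≤ bot_r ∧ left_c ≤ rc.2 ∧ rc.2 ≤ right_c) then
                 pySet2 o (if rc.1 < top_r then top_r - 1 else if rc.1 > bot_r then bot_r + 1 else rc.1)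
                   (if rc.2 < left_c then left_c - 1 else if rc.2 > right_c then right_c + 1 else rc.2) s
               else o)
             (List.foldl
          (fun o r => List.foldl (fun o c => pySet2 o r c rect_color) o (PySem.List.pyRange left_c (right_c + 1)))
          (List.replicate rows.toNat (List.replicate cols.toNat bg))
          (PySem.List.pyRange top_r (bot_r + 1)))
             (List.filter (fun p => pvCellVal grid p.1 p.2 == s) (pvCells rows cols))) := by
  obtain ⟨s1, s2⟩ := stv
  cases s1 with
  | none => rfl
  | some b5 =>
    obtain ⟨rect_color, top_r, bot_r, left_c, right_c⟩ := b5
    dsimp only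
    rw [pv_comp_eq_filter rows cols (fun r c => some (pvCellVal grid r c) == s2)]
    cases s2 with
    | none =>
      have hnil : (pvCells rows cols).filter (fun q => some (pvCellVal grid q.1 q.2) == (none : Option Int)) = [] := by
        simp
      rw [hnil]
      rfl
    | some s =>
      have hpred : (pvCells rows cols).filter (fun q => some (pvCellVal grid q.1 q.2) == some s)
          = (pvCells rows cols).filter (fun q => pvCellVal grid q.1 q.2 == s) := by
        apply List.filter_congr
        intro q _
        simp
      rw [hpred]
      exact pv_write_eq top_r bot_r left_c right_c s _ _

theorem pv_main (grid : List (List Int)) : transform grid = transform_alt grid := by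
  simp only [transform, transform_alt]
  rw [pv_freq_eq]
  rw [pv_foldl_nested (f := fun d r c => PySem.Dict.modify d (pvCellVal grid r c) [] (fun ps => ps ++ [(r, c)]))]
  simp only [pv_counts_eq, pv_bucket_getD]
  cases hcol : PySem.List.sorted (PySem.Dict.counter ((pvCells (grid.length : Int) ((PySem.List.pyGetD grid 0 []).length : Int)).map (pvVal grid))).items (fun kv => kv.2) true with
  | nil => rfl
  | cons hd rest =>
    obtain ⟨bg, cnt⟩ := hd
    dsimp only
    rw [List.foldl_map]
    simp only [pv_body_eq]
    rw [pv_tail_eq]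

-- ===== VERDICT (by name: the statement is the Claim_ definition above) =====
theorem transform_spec : Claim_equal_transform := by
  intro grid _ _
  unfold Spec_transform
  exact pv_main grid
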